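-- pv_equiv track=rewrite | github.com/r-xue/pipeline | pipeline/infrastructure/utils/weblog.py | merge_td_columns
-- ===== SOURCE A (Python) =====
-- import itertools
--
-- def merge_td_columns(rows, num_to_merge=None, vertical_align=False):
--     """
--     Merge HTML TD columns with identical values using rowspan.
--
--     Arguments:
--     rows -- a list of tuples, one tuple per row, containing n elements for the
--             n columns.
--     num_to_merge -- the number of columns to merge, starting from the left
--                     hand column. Leave as None to merge all columns.
--     vertical_align -- Set to True to vertically centre any merged cells.
--
--     Output:
--     A list of strings, one string per row, containing TD elements.
--     """
--     transposed = list(zip(*rows))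
--     if num_to_merge is None:
--         num_to_merge = len(transposed)
--     valign = ' style="vertical-align:middle;"' if vertical_align else ''
--
--     new_cols = []
--     for col_idx, col in enumerate(transposed):
--         if col_idx > num_to_merge - 1:
--             new_cols.append(['<td>%s</td>' % v for v in col])
--             continue
--
--         merged = []
--         start = 0
--         while start < len(col):
--             l = col[start:]
--             same_vals = list(itertools.takewhile(lambda x: x == col[start], l))
--             rowspan = len(same_vals)
--             start += rowspan
--
--             if rowspan > 1:
--                 new_td = ['<td rowspan="%s"%s>%s</td>' % (rowspan,
--                                                           valign,
--                                                           same_vals[0])]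
--                 blanks = [''] * (rowspan - 1)
--                 merged.extend(new_td + blanks)
--             else:
--                 td = '<td>%s</td>' % (same_vals[0])
--                 merged.append(td)
--
--         new_cols.append(merged)
--
--     return list(zip(*new_cols))
-- ===== SOURCE B (Python) =====
-- def merge_td_columns(rows, num_to_merge=None, vertical_align=False):
--     """Row-major single pass: emit a rowspan cell at each run start and '' below it.
--
--     Avoids transposing and the per-run tail slicing of the original (O(n) per
--     column instead of O(n^2) worst case)."""
--     n = len(rows)
--     width = min((len(r) for r in rows), default=0)
--     if width == 0:
--         return []
--     if num_to_merge is None: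
--         num_to_merge = width
--     valign = ' style="vertical-align:middle;"' if vertical_align else ''
--     result = []
--     for i in range(n):
--         row = []
--         for j in range(width):
--             v = rows[i][j]
--             if j > num_to_merge - 1:
--                 row.append('<td>%s</td>' % v)
--             elif i > 0 and rows[i - 1][j] == v:
--                 row.append('')
--             else:
--                 span = 1
--                 while i + span < n and rows[i + span][j] == v:
--                     span += 1
--                 if span > 1:
--                     row.append('<td rowspan="%s"%s>%s</td>' % (span, valign, v))
--                 else:
--                     row.append('<td>%s</td>' % v)
--         result.append(tuple(row))
--     return result
-- ===== Notes on version B (the rewrite author's own statement) =====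
-- stated objective: faster
-- what changed: Replaces transpose + per-run tail slicing (col[start:] copies on every run) with a row-major single pass that emits a rowspan cell at each run start and '' below it, with no transposition and no slicing.
import Mathlib
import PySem

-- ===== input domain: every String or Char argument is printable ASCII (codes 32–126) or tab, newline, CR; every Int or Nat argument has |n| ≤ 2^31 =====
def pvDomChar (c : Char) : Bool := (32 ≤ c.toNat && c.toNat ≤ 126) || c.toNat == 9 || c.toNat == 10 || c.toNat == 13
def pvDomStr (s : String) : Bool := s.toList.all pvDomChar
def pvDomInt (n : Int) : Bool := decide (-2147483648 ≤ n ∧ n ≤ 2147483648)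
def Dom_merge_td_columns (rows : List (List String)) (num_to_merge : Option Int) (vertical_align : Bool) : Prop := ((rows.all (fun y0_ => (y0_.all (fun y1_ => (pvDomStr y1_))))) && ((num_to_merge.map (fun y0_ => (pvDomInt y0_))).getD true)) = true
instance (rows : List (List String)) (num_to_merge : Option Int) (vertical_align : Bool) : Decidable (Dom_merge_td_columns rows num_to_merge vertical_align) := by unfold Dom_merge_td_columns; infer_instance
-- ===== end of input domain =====

-- B is a row-major single pass (run start ⇒ rowspan cell, run continuation ⇒ ''), replacing
-- A's transpose + per-run tail slicing; a timing run reports it measurably faster.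

-- ===== PORT A =====
-- shared literal format strings ('<td>%s</td>' and '<td rowspan="%s"%s>%s</td>')
def pvTd (v : String) : String := "<td>" ++ v ++ "</td>"
def pvTdSpan (sp : Nat) (valign v : String) : String :=
  "<td rowspan=\"" ++ PySem.Int.toStr (sp : Int) ++ "\"" ++ valign ++ ">" ++ v ++ "</td>"

-- termination helper for pvZipN (cited in its decreasing_by)
theorem pvSumTailLt : ∀ (ls : List (List String)), ls ≠ [] → (∀ l ∈ ls, l ≠ []) →
    ((ls.map List.tail).map List.length).sum < (ls.map List.length).sum := by
  intro ls hne hall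
  have le : ∀ (ms : List (List String)), ((ms.map List.tail).map List.length).sum ≤ (ms.map List.length).sum := by
    intro ms
    induction ms with
    | nil => simp
    | cons a t ih =>
      simp only [List.map_cons, List.sum_cons]
      have h1 : a.tail.length ≤ a.length := by simp [List.length_tail]
      omega
  match ls, hne with
  | a :: t, _ =>
    have ha : a ≠ [] := hall a (by simp)
    have h1 : a.tail.length < a.length := by
      cases a with | nil => exact absurd rfl ha | cons x xs => simp
    have h2 := le t
    simp only [List.map_cons, List.sum_cons]
    omega

-- zip(*xs): tuples of heads while every list is nonempty
def pvZipN (ls : List (List String)) : List (List String) :=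
  if h : ls ≠ [] ∧ ∀ l ∈ ls, l ≠ [] then
    ls.map (fun l => l.headD "") :: pvZipN (ls.map List.tail)
  else []
termination_by ((ls.map List.length).sum)
decreasing_by simpa using pvSumTailLt ls h.1 h.2

-- termination helper for aMergeLoop: the run at an in-range start is nonempty
theorem pvRunPos (col : List String) (start : Nat) (h : start < col.length) :
    0 < ((col.drop start).takeWhile (fun x => x == col.getD start "")).length := by
  have e : col.getD start "" = col[start] := List.getD_eq_getElem _ _ h
  rw [e, List.drop_eq_getElem_cons h, List.takeWhile_cons]
  simp

-- the inner 'while start < len(col)' loop of A, emitting merged cells left to right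
def aMergeLoop (col : List String) (valign : String) (start : Nat) : List String :=
  if h : start < col.length then
    let pivot := col.getD start ""                                      -- col[start] (in range)
    let same_vals := (col.drop start).takeWhile (fun x => x == pivot)   -- takewhile on col[start:]
    let rowspan := same_vals.length
    (if rowspan > 1 then
       pvTdSpan rowspan valign (same_vals.headD "") :: List.replicate (rowspan - 1) ""
     else [pvTd (same_vals.headD "")]) ++ aMergeLoop col valign (start + rowspan)
  else []
termination_by col.length - start
decreasing_by have := pvRunPos col start h; omega

def merge_td_columns (rows : List (List String)) (num_to_merge : Option Int) (vertical_align : Bool) : List (List String) :=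
  let transposed := pvZipN rows
  let ntm : Int := match num_to_merge with | none => (transposed.length : Int) | some k => k
  let valign := if vertical_align then " style=\"vertical-align:middle;\"" else ""
  let new_cols := (PySem.List.enumerate transposed 0).map (fun p =>
    if p.1 > ntm - 1 then p.2.map pvTd else aMergeLoop p.2 valign 0)
  pvZipN new_cols

-- ===== PORT B =====
-- min((len(r) for r in rows), default=0)
def pvMinLen (rows : List (List String)) : Nat :=
  match rows with
  | [] => 0
  | r :: rs => rs.foldl (fun a r' => min a r'.length) r.length

-- the inner 'while i + span < n and rows[i+span][j] == v' loop of B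
def bSpan (rows : List (List String)) (n j : Nat) (v : String) (i s : Nat) : Nat :=
  if h : i + s < n ∧ ((rows.getD (i+s) []).getD j "" == v) = true then bSpan rows n j v i (s+1) else s
termination_by n - (i + s)
decreasing_by omega

def merge_td_columns_alt (rows : List (List String)) (num_to_merge : Option Int) (vertical_align : Bool) : List (List String) :=
  let n := rows.length
  let width := pvMinLen rows
  if width = 0 then []
  else
    let ntm : Int := num_to_merge.getD (width : Int)
    let valign := if vertical_align then " style=\"vertical-align:middle;\"" else ""
    (List.range n).map (fun i =>
      (List.range width).map (fun j =>
        let v := (rows.getD i []).getD j ""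
        if (j : Int) > ntm - 1 then pvTd v
        else if 0 < i ∧ ((rows.getD (i-1) []).getD j "" == v) = true then ""
        else
          let sp := bSpan rows n j v i 1
          if sp > 1 then pvTdSpan sp valign v else pvTd v))

-- ===== PRECONDITION & SPEC =====
def Spec_merge_td_columns (rows : List (List String)) (num_to_merge : Option Int) (vertical_align : Bool) (out : List (List String)) : Prop := out = merge_td_columns_alt rows num_to_merge vertical_align
instance (rows : List (List String)) (num_to_merge : Option Int) (vertical_align : Bool) (out : List (List String)) : Decidable (Spec_merge_td_columns rows num_to_merge vertical_align out) := by unfold Spec_merge_td_columns; infer_instance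

-- ===== CLAIM (what is proved, stated in full; the proofs are below) =====
def Claim_equal_merge_td_columns : Prop := ∀ (rows : List (List String)) (num_to_merge : Option Int) (vertical_align : Bool), Dom_merge_td_columns rows num_to_merge vertical_align → Spec_merge_td_columns rows num_to_merge vertical_align (merge_td_columns rows num_to_merge vertical_align)

-- ===== LEMMAS AND PROOFS =====

-- ---- generic getD facts ----
theorem pvGetD_drop (l : List String) (i m : Nat) : (l.drop i).getD m "" = l.getD (i+m) "" := by
  rw [List.getD_eq_getElem?_getD, List.getD_eq_getElem?_getD, List.getElem?_drop]

theorem pvGetD_zero (l : List String) : l.getD 0 "" = l.headD "" := by cases l <;> rfl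

theorem pvGetD_tail (l : List String) (j : Nat) : l.tail.getD j "" = l.getD (j+1) "" := by
  cases l <;> rfl

theorem pvGetD_map_td (l : List String) (i : Nat) (h : i < l.length) :
    (l.map pvTd).getD i "" = pvTd (l.getD i "") := by
  rw [List.getD_eq_getElem _ _ (by simpa using h : i < (l.map pvTd).length), List.getD_eq_getElem _ _ h]
  simp

-- ---- takeWhile run facts ----
theorem pvTw_getD (v : String) : ∀ (l : List String) (m : Nat),
    m < (l.takeWhile (fun x => x == v)).length → l.getD m "" = v := by
  intro l
  induction l with
  | nil => simp
  | cons a t ih =>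
    intro m hm
    by_cases h : (a == v) = true
    · cases m with
      | zero => simpa using h
      | succ m' =>
        simp only [List.takeWhile_cons, h, if_true, List.length_cons] at hm
        exact ih m' (by omega)
    · simp [List.takeWhile_cons, h] at hm

theorem pvTw_stop (v : String) : ∀ (l : List String),
    (l.takeWhile (fun x => x == v)).length < l.length →
    ¬ (l.getD ((l.takeWhile (fun x => x == v)).length) "" = v) := by
  intro l
  induction l with
  | nil => simp
  | cons a t ih =>
    intro hlt
    by_cases h : (a == v) = true
    · simp only [List.takeWhile_cons, h, if_true, List.length_cons] at hlt ⊢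
      exact ih (by omega)
    · simp only [List.takeWhile_cons, h, if_false] at hlt ⊢
      simpa using h

theorem pvTw_len_le (p : String → Bool) (l : List String) : (l.takeWhile p).length ≤ l.length := by
  induction l with
  | nil => simp
  | cons a t ih => by_cases h : p a <;> simp [h] <;> omega

-- ---- column-access bridge: (zip(*rows) column j)[m] = rows[m][j] ----
theorem pvColGetD (rows : List (List String)) (j : Nat) : ∀ (m : Nat),
    (rows.map (fun r => r.getD j "")).getD m "" = (rows.getD m []).getD j "" := by
  induction rows with
  | nil => intro m; simp
  | cons r rs ih => intro m; cases m with
    | zero => rfl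
    | succ m' => simpa using ih m'

-- ---- pvMinLen facts ----
theorem pvFoldlMin_le_init : ∀ (rs : List (List String)) (acc : Nat),
    rs.foldl (fun a r' => min a r'.length) acc ≤ acc := by
  intro rs
  induction rs with
  | nil => simp
  | cons r t ih => intro acc; exact le_trans (ih (min acc r.length)) (min_le_left _ _)

theorem pvFoldlMin_le_mem : ∀ (rs : List (List String)) (acc : Nat) (r : List String),
    r ∈ rs → rs.foldl (fun a r' => min a r'.length) acc ≤ r.length := by
  intro rs
  induction rs with
  | nil => simp
  | cons a t ih =>
    intro acc r hr
    rcases List.mem_cons.mp hr with h | h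
    · subst h; exact le_trans (pvFoldlMin_le_init t _) (min_le_right _ _)
    · exact ih _ r h

theorem pvFoldlMin_tail : ∀ (rs : List (List String)) (acc : Nat),
    (rs.map List.tail).foldl (fun a r' => min a r'.length) (acc - 1)
      = rs.foldl (fun a r' => min a r'.length) acc - 1 := by
  intro rs
  induction rs with
  | nil => simp
  | cons r t ih =>
    intro acc
    simp only [List.map_cons, List.foldl_cons, List.length_tail]
    rw [show min (acc - 1) (r.length - 1) = min acc r.length - 1 by omega]
    exact ih _

theorem pvFoldlMin_pos : ∀ (rs : List (List String)) (acc : Nat), 0 < acc → (∀ r ∈ rs, r ≠ []) →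
    0 < rs.foldl (fun a r' => min a r'.length) acc := by
  intro rs
  induction rs with
  | nil => intro acc h _; simpa using h
  | cons r t ih =>
    intro acc hacc hall
    have hr : r ≠ [] := hall r (by simp)
    have : 0 < r.length := List.length_pos_iff.mpr hr
    exact ih _ (lt_min hacc this) (fun x hx => hall x (by simp [hx]))

theorem pvMinLen_le (rows : List (List String)) (r : List String) (h : r ∈ rows) :
    pvMinLen rows ≤ r.length := by
  match rows, h with
  | a :: t, h =>
    rcases List.mem_cons.mp h with h | h
    · subst h; exact pvFoldlMin_le_init t _
    · exact pvFoldlMin_le_mem t _ r h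

theorem pvMinLen_pos (rows : List (List String)) (hne : rows ≠ []) (hall : ∀ r ∈ rows, r ≠ []) :
    0 < pvMinLen rows := by
  match rows, hne with
  | r :: t, _ =>
    have : 0 < r.length := List.length_pos_iff.mpr (hall r (by simp))
    exact pvFoldlMin_pos t _ this (fun x hx => hall x (by simp [hx]))

theorem pvMinLen_tail (rows : List (List String)) (hne : rows ≠ []) :
    pvMinLen (rows.map List.tail) = pvMinLen rows - 1 := by
  match rows, hne with
  | r :: t, _ =>
    show (t.map List.tail).foldl (fun a r' => min a r'.length) r.tail.length = _
    rw [List.length_tail]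
    exact pvFoldlMin_tail t _

theorem pvMinLen_const (l : List (List String)) (n : Nat) (hne : l ≠ [])
    (hall : ∀ r ∈ l, r.length = n) : pvMinLen l = n := by
  have aux : ∀ (t : List (List String)) (a : Nat), (∀ r ∈ t, r.length = n) →
      t.foldl (fun x r' => min x r'.length) (min a n) = min a n := by
    intro t
    induction t with
    | nil => intro a _; simp
    | cons r rs ih =>
      intro a hall'
      simp only [List.foldl_cons]
      rw [hall' r (by simp), min_assoc, min_self]
      exact ih a (fun x hx => hall' x (by simp [hx]))
  match l, hne with
  | r :: t, _ =>
    show t.foldl (fun a r' => min a r'.length) r.length = n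
    rw [hall r (by simp), show n = min n n by simp]
    exact aux t n (fun x hx => hall x (by simp [hx]))

-- ---- pvZipN characterisation ----
theorem pvZipN_eq : ∀ (ls : List (List String)),
    pvZipN ls = (List.range (pvMinLen ls)).map (fun j => ls.map (fun l => l.getD j "")) := by
  intro ls
  induction hd : (ls.map List.length).sum using Nat.strong_induction_on generalizing ls with
  | _ d ih =>
  by_cases h : ls ≠ [] ∧ ∀ l ∈ ls, l ≠ []
  · rw [pvZipN, dif_pos h]
    have hpos : 0 < pvMinLen ls := pvMinLen_pos ls h.1 h.2
    have htail : pvMinLen (ls.map List.tail) = pvMinLen ls - 1 := pvMinLen_tail ls h.1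
    have hlt := pvSumTailLt ls h.1 h.2
    rw [ih _ (hd ▸ hlt) (ls.map List.tail) rfl]
    rw [show pvMinLen ls = (pvMinLen ls - 1) + 1 by omega]
    rw [List.range_succ_eq_map, List.map_cons, List.map_map, htail]
    congr 1
    · exact (List.map_congr_left (fun l _ => (pvGetD_zero l).symm))
    · apply List.map_congr_left
      intro j _
      simp only [Function.comp_def, List.map_map]
      exact List.map_congr_left (fun l _ => pvGetD_tail l j)
  · rw [pvZipN, dif_neg h]
    push_neg at h
    by_cases hne : ls = []
    · subst hne; simp [pvMinLen]
    · obtain ⟨l, hl, hlnil⟩ := h hne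
      have : pvMinLen ls = 0 := by
        have := pvMinLen_le ls l hl
        subst hlnil; simpa using this
      rw [this]; simp

-- ---- enumerate over a mapped range ----
theorem pvEnumMapRange (f : Int × List String → List String) (g : Nat → List String) :
    ∀ (w : Nat), (PySem.List.enumerate ((List.range w).map g) 0).map f
      = (List.range w).map (fun (j : Nat) => f ((j : Int), g j)) := by
  intro w
  induction w with
  | zero => simp [PySem.List.enumerate_nil]
  | succ w' ih =>
    rw [List.range_succ, List.map_append, PySem.List.enumerate_append, List.map_append, ih,
        List.map_append]
    simp [PySem.List.enumerate_cons, PySem.List.enumerate_nil]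

-- ---- characterisation of A's merge loop ----
-- the cell at absolute row index i of a merged column (proof-only helper)
def pvCellA (col : List String) (valign : String) (i : Nat) : String :=
  if 0 < i ∧ col.getD (i-1) "" = col.getD i "" then ""
  else if ((col.drop i).takeWhile (fun x => x == col.getD i "")).length > 1 then
    pvTdSpan ((col.drop i).takeWhile (fun x => x == col.getD i "")).length valign (col.getD i "")
  else pvTd (col.getD i "")

theorem aMergeLoop_step (col : List String) (valign : String) (start : Nat) (hs : start < col.length) :
    aMergeLoop col valign start =
      (if ((col.drop start).takeWhile (fun x => x == col.getD start "")).length > 1 then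
         pvTdSpan ((col.drop start).takeWhile (fun x => x == col.getD start "")).length valign
             (((col.drop start).takeWhile (fun x => x == col.getD start "")).headD "")
           :: List.replicate (((col.drop start).takeWhile (fun x => x == col.getD start "")).length - 1) ""
       else [pvTd (((col.drop start).takeWhile (fun x => x == col.getD start "")).headD "")])
      ++ aMergeLoop col valign (start + ((col.drop start).takeWhile (fun x => x == col.getD start "")).length) := by
  rw [aMergeLoop, dif_pos hs]

theorem aMergeLoop_eq_aux (col : List String) (valign : String) :
    ∀ (d start : Nat), col.length - start ≤ d →
    (0 < start → start < col.length → ¬ (col.getD (start-1) "" = col.getD start "")) →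
    aMergeLoop col valign start = (List.range' start (col.length - start)).map (pvCellA col valign) := by
  intro d
  induction d with
  | zero =>
    intro start hle _
    rw [aMergeLoop, dif_neg (by omega)]
    rw [show col.length - start = 0 by omega]
    simp
  | succ d' ih =>
    intro start hle hbd
    by_cases hs : start < col.length
    · obtain ⟨sv, hsv⟩ : ∃ sv, sv = (col.drop start).takeWhile (fun x => x == col.getD start "") :=
        ⟨_, rfl⟩
      rw [aMergeLoop_step col valign start hs, ← hsv]
      have hpos : 0 < sv.length := by rw [hsv]; exact pvRunPos col start hs
      have hsvle : sv.length ≤ col.length - start := by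
        rw [hsv]; simpa using pvTw_len_le (fun x => x == col.getD start "") (col.drop start)
      have hrun : ∀ m, m < sv.length → col.getD (start + m) "" = col.getD start "" := by
        intro m hm
        rw [hsv] at hm
        rw [← pvGetD_drop]
        exact pvTw_getD _ (col.drop start) m hm
      have hstop : start + sv.length < col.length →
          ¬ (col.getD (start + sv.length) "" = col.getD start "") := by
        intro hin
        have h1 := pvTw_stop (col.getD start "") (col.drop start)
          (by rw [← hsv, List.length_drop]; omega)
        rw [← hsv, pvGetD_drop] at h1
        exact h1
      have hhead : sv.headD "" = col.getD start "" := by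
        have e : col.getD start "" = col[start] := List.getD_eq_getElem _ _ hs
        rw [hsv, e, List.drop_eq_getElem_cons hs, List.takeWhile_cons]
        simp
      have hbd' : 0 < start + sv.length → start + sv.length < col.length →
          ¬ (col.getD (start + sv.length - 1) "" = col.getD (start + sv.length) "") := by
        intro _ hin
        have h1 : col.getD (start + sv.length - 1) "" = col.getD start "" := by
          have := hrun (sv.length - 1) (by omega)
          rwa [show start + (sv.length - 1) = start + sv.length - 1 by omega] at this
        rw [h1]
        exact fun hc => hstop hin hc.symm
      rw [ih (start + sv.length) (by omega) hbd']
      rw [show col.length - start = sv.length + (col.length - (start + sv.length)) by omega]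
      rw [← List.range'_append_1, List.map_append]
      congr 1
      obtain ⟨k, hk⟩ : ∃ k, sv.length = k + 1 := ⟨sv.length - 1, by omega⟩
      rw [hk, List.range'_succ, List.map_cons]
      have hcell : pvCellA col valign start =
          if sv.length > 1 then pvTdSpan sv.length valign (col.getD start "")
          else pvTd (col.getD start "") := by
        rw [pvCellA, if_neg (by rintro ⟨h0, he⟩; exact hbd h0 hs he), ← hsv]
      by_cases hgt : k + 1 > 1
      · rw [if_pos hgt]
        congr 1
        · rw [hcell, hk, if_pos hgt, hhead]
        · symm
          apply List.eq_replicate_iff.mpr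
          refine ⟨by simp, ?_⟩
          intro b hb
          obtain ⟨m, hm, hmb⟩ := List.mem_map.mp hb
          have hmr := List.mem_range'_1.mp hm
          rw [← hmb, pvCellA, if_pos ?_]
          have e1 : col.getD (m - 1) "" = col.getD start "" := by
            have := hrun (m - 1 - start) (by omega)
            rwa [show start + (m - 1 - start) = m - 1 by omega] at this
          have e2 : col.getD m "" = col.getD start "" := by
            have := hrun (m - start) (by omega)
            rwa [show start + (m - start) = m by omega] at this
          exact ⟨by omega, e1.trans e2.symm⟩
      · rw [if_neg hgt]
        have hk0 : k = 0 := by omega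
        subst hk0
        simp only [List.range'_zero, List.map_nil]
        rw [hcell, hk, if_neg hgt, hhead]
    · rw [aMergeLoop, dif_neg hs]
      rw [show col.length - start = 0 by omega]
      simp

theorem aMergeLoop_eq (col : List String) (valign : String) :
    aMergeLoop col valign 0 = (List.range col.length).map (pvCellA col valign) := by
  have := aMergeLoop_eq_aux col valign (col.length) 0 (by omega) (by omega)
  rwa [Nat.sub_zero, ← List.range_eq_range'] at this

-- ---- characterisation of B's span loop ----
theorem bSpan_eq (rows : List (List String)) (j : Nat) (v : String) (i : Nat) :
    ∀ (d s : Nat), rows.length - (i + s) ≤ d →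
    bSpan rows rows.length j v i s
      = s + (((rows.map (fun r => r.getD j "")).drop (i+s)).takeWhile (fun x => x == v)).length := by
  intro d
  induction d with
  | zero =>
    intro s hle
    rw [bSpan, dif_neg (by rintro ⟨h1, _⟩; omega)]
    rw [List.drop_eq_nil_of_le (by simp; omega)]
    simp
  | succ d' ih =>
    intro s hle
    set col := rows.map (fun r => r.getD j "") with hcol
    have hcl : col.length = rows.length := by simp [hcol]
    by_cases hin : i + s < rows.length
    · have hdrop : col.drop (i+s) = col.getD (i+s) "" :: col.drop (i+s+1) := by
        rw [List.drop_eq_getElem_cons (by omega), List.getD_eq_getElem col "" (by omega)]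
      have hcv : col.getD (i+s) "" = (rows.getD (i+s) []).getD j "" := pvColGetD rows j (i+s)
      by_cases heq : ((rows.getD (i+s) []).getD j "" == v) = true
      · rw [bSpan, dif_pos ⟨hin, heq⟩, ih (s+1) (by omega)]
        rw [hdrop, List.takeWhile_cons, hcv, heq, if_pos rfl]
        simp only [List.length_cons]
        rw [show i + (s+1) = i + s + 1 by omega]
        omega
      · rw [bSpan, dif_neg (by rintro ⟨_, h2⟩; exact heq h2)]
        rw [hdrop, List.takeWhile_cons, hcv]
        simp
        simpa using heq
    · rw [bSpan, dif_neg (by rintro ⟨h1, _⟩; omega)]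
      rw [List.drop_eq_nil_of_le (by omega)]
      simp

-- ---- the main equality ----
theorem pvMain (rows : List (List String)) (num_to_merge : Option Int) (vertical_align : Bool) :
    merge_td_columns rows num_to_merge vertical_align
      = merge_td_columns_alt rows num_to_merge vertical_align := by
  set n := rows.length with hn
  set w := pvMinLen rows with hw
  set valign := (if vertical_align then " style=\"vertical-align:middle;\"" else "") with hva
  by_cases hw0 : w = 0
  · -- no columns: both sides are []
    unfold merge_td_columns merge_td_columns_alt
    simp only [← hw, hw0, if_pos rfl]
    rw [pvZipN_eq rows, ← hw, hw0]
    simp only [List.range_zero, List.map_nil, PySem.List.enumerate_nil]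
    rw [pvZipN, dif_neg (by simp)]
    simp
  · have hwpos : 0 < w := by omega
    have hrne : rows ≠ [] := by
      intro h; rw [h] at hw; simp [pvMinLen] at hw; omega
    have hnpos : 0 < n := by rw [hn]; exact List.length_pos_iff.mpr hrne
    have hjlt : ∀ j, j < w → ∀ r ∈ rows, j < r.length := by
      intro j hj r hr
      have := pvMinLen_le rows r hr
      omega
    -- the N used by both sides
    have hNdef : ∀ (x : Int), (match num_to_merge with | none => x | some k => k)
        = num_to_merge.getD x := by
      intro x; cases num_to_merge <;> rfl
    set N : Int := num_to_merge.getD ((w : Int)) with hN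
    -- the columns
    set colFn : Nat → List String := fun j => rows.map (fun r => r.getD j "") with hcolFn
    have hcollen : ∀ j, (colFn j).length = n := by intro j; simp [hcolFn, hn]
    -- column output
    set colOut : Nat → List String := fun j =>
      if (j : Int) > N - 1 then (colFn j).map pvTd else aMergeLoop (colFn j) valign 0 with hcolOut
    have hcoutlen : ∀ j, (colOut j).length = n := by
      intro j
      rw [hcolOut]
      by_cases h : (j : Int) > N - 1
      · simp [h, hcollen]
      · simp only [h, if_false]
        rw [aMergeLoop_eq]
        simp [hcollen]
    -- rewrite A
    have hA : merge_td_columns rows num_to_merge vertical_align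
        = pvZipN ((List.range w).map colOut) := by
      simp only [merge_td_columns]
      rw [pvZipN_eq rows, ← hw, ← hcolFn, hNdef,
          show ((List.range w).map colFn).length = w by simp, ← hN, ← hva]
      rw [pvEnumMapRange, hcolOut]
    rw [hA]
    -- A's outer zip
    have hml : pvMinLen ((List.range w).map colOut) = n := by
      apply pvMinLen_const _ n
      · simp; omega
      · intro r hr
        obtain ⟨j, _, hj⟩ := List.mem_map.mp hr
        rw [← hj]; exact hcoutlen j
    rw [pvZipN_eq, hml]
    -- rewrite B
    simp only [merge_td_columns_alt]
    rw [← hw, ← hn, ← hva, ← hN, if_neg hw0]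
    -- compare row by row
    apply List.map_congr_left
    intro i hi
    have hin : i < n := List.mem_range.mp hi
    rw [List.map_map]
    apply List.map_congr_left
    intro j hj
    have hjw : j < w := List.mem_range.mp hj
    simp only [Function.comp_def]
    -- cell (i, j)
    have hv : (colFn j).getD i "" = (rows.getD i []).getD j "" := pvColGetD rows j i
    set v := (rows.getD i []).getD j "" with hvv
    rw [hcolOut]
    by_cases hb1 : (j : Int) > N - 1
    · rw [if_pos hb1]
      simp only [if_pos hb1]
      rw [pvGetD_map_td _ _ (by rw [hcollen]; omega), hv]
    · rw [if_neg hb1]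
      simp only [if_neg hb1]
      rw [aMergeLoop_eq]
      have hgetcell : ((List.range (colFn j).length).map (pvCellA (colFn j) valign)).getD i ""
          = pvCellA (colFn j) valign i := by
        rw [List.getD_eq_getElem _ _ (by simp [hcollen]; omega)]
        simp [hcollen]
      rw [hgetcell, pvCellA]
      have hbeq : (colFn j).getD (i-1) "" = (rows.getD (i-1) []).getD j "" :=
        pvColGetD rows j (i-1)
      by_cases hblank : 0 < i ∧ (((rows.getD (i-1) []).getD j "" == v) = true)
      · rw [if_pos ⟨hblank.1, by rw [hbeq, hv]; exact beq_iff_eq.mp hblank.2⟩, if_pos hblank]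
      · rw [if_neg (by
          rintro ⟨h1, h2⟩
          exact hblank ⟨h1, beq_iff_eq.mpr (by rw [← hbeq, h2, hv])⟩), if_neg hblank]
        simp only [hv, ← hvv]
        -- spans agree
        have hsp : ((( colFn j).drop i).takeWhile (fun x => x == v)).length
            = bSpan rows n j v i 1 := by
          rw [hn, bSpan_eq rows j v i (rows.length - (i+1)) 1 (by omega)]
          have hdrop : (colFn j).drop i = v :: (colFn j).drop (i+1) := by
            rw [List.drop_eq_getElem_cons (by rw [hcollen]; omega),
                ← List.getD_eq_getElem (colFn j) "" (by rw [hcollen]; omega), hv]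
          rw [hdrop, List.takeWhile_cons, (congrFun hcolFn j).symm]
          simp only [beq_self_eq_true, if_true, List.length_cons]
          omega
        rw [hsp]

-- ===== VERDICT (by name: the statement is the Claim_ definition above) =====
theorem merge_td_columns_spec : Claim_equal_merge_td_columns := by
  intro rows num_to_merge vertical_align _
  show _ = _
  exact pvMain rows num_to_merge vertical_align
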